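-- pv_equiv track=rewrite | github.com/lvzhanhe/CS61A | proj1_hog/hog.py | free_bacon
-- ===== SOURCE A (Python) =====
-- def free_bacon(opponent_score):
--     """Return the points scored from rolling 0 dice (Free Bacon)."""
--     # BEGIN PROBLEM 2
--     max = 0
--     while opponent_score > 0:
--         this = opponent_score % 10
--         opponent_score //= 10
--         if max < this:
--             max = this
--     return max + 1
-- ===== SOURCE B (Python) =====
-- def free_bacon(opponent_score):
--     """Return the points scored from rolling 0 dice (Free Bacon)."""
--     if opponent_score <= 0:
--         return 1
--     return max(int(c) for c in str(opponent_score)) + 1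
-- ===== Notes on version B (the rewrite author's own statement) =====
-- stated objective: idiomatic
-- what changed: B replaces A's manual %10///10 digit-peeling loop with a running maximum by rendering the score as its decimal string and taking the builtin max over its digit characters, guarding non-positive scores first.
import Mathlib
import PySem

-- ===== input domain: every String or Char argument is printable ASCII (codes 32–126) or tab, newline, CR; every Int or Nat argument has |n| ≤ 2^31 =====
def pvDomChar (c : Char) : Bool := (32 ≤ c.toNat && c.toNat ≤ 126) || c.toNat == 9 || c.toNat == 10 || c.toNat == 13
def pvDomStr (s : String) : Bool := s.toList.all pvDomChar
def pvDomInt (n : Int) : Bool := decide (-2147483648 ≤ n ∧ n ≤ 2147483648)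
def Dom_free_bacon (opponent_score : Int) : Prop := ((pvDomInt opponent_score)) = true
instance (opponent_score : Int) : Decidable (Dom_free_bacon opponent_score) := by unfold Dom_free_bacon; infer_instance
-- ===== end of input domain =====

-- B renders the score as its decimal string and takes the builtin max over its digit
-- characters (guarding non-positive scores first) instead of A's %10-//10 peel loop.

-- ===== PORT A =====
-- the while-loop of A: state (opponent_score, max), returns the final max
def freeBaconLoop (n m : Int) : Int :=
  if _h : 0 < n then
    freeBaconLoop (PySem.Int.floordiv n 10)
      (if m < PySem.Int.mod n 10 then PySem.Int.mod n 10 else m)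
  else m
termination_by n.toNat
decreasing_by
  simp only [PySem.Int.floordiv, Int.fdiv_eq_ediv]
  omega

def free_bacon (opponent_score : Int) : Int :=
  freeBaconLoop opponent_score 0 + 1

-- ===== PORT B =====
def free_bacon_alt (opponent_score : Int) : Int :=
  if opponent_score ≤ 0 then 1
  else
    -- max(int(c) for c in str(opponent_score)); int(c) on the digit characters of a
    -- positive int's str is exactly c.toNat - 48, which is exact here
    (PySem.List.max?
      ((PySem.Int.toChars opponent_score).map (fun c => ((c.toNat : Int) - 48)))
      (fun x => x)).getD 0 + 1

-- ===== PRECONDITION & SPEC =====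
def Spec_free_bacon (opponent_score : Int) (out : Int) : Prop := out = free_bacon_alt opponent_score
instance (opponent_score : Int) (out : Int) : Decidable (Spec_free_bacon opponent_score out) := by unfold Spec_free_bacon; infer_instance

-- ===== CLAIM (what is proved, stated in full; the proofs are below) =====
def Claim_equal_free_bacon : Prop := ∀ (opponent_score : Int), Dom_free_bacon opponent_score → Spec_free_bacon opponent_score (free_bacon opponent_score)

-- ===== LEMMAS AND PROOFS =====

-- A's loop computes the foldl-max of all base-10 digits over the accumulator
theorem freeBaconLoop_digits (k : Nat) (hk : 0 < k) (m : Int) :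
    freeBaconLoop (k : Int) m
      = ((Nat.digits 10 k).map (fun (d : Nat) => (d : Int))).foldl max m := by
  induction k using Nat.strong_induction_on generalizing m with
  | _ k ih =>
    rw [freeBaconLoop]
    have hk' : (0 : Int) < (k : Int) := by exact_mod_cast hk
    rw [dif_pos hk']
    have hmod : PySem.Int.mod (k : Int) 10 = ((k % 10 : Nat) : Int) := by
      simp only [PySem.Int.mod, Int.fmod_eq_emod]
      omega
    have hdiv : PySem.Int.floordiv (k : Int) 10 = ((k / 10 : Nat) : Int) := by
      simp only [PySem.Int.floordiv, Int.fdiv_eq_ediv]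
      omega
    rw [hmod, hdiv, Nat.digits_def' (by norm_num : 1 < 10) hk]
    simp only [List.map_cons, List.foldl_cons]
    have hstep : (if m < ((k % 10 : Nat) : Int) then ((k % 10 : Nat) : Int) else m)
        = max m ((k % 10 : Nat) : Int) := by
      rw [max_def]; split_ifs <;> first | rfl | omega
    rw [hstep]
    by_cases hq : k / 10 = 0
    · rw [hq]
      rw [freeBaconLoop]
      simp
    · exact ih (k / 10) (Nat.div_lt_self hk (by norm_num)) (Nat.pos_of_ne_zero hq) _

-- Nat.toDigits on a positive n is the reversed digitChar image of Nat.digits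
theorem toDigitsCore_eq (fuel : Nat) : ∀ (n : Nat) (ds : List Char), 0 < n → n ≤ fuel →
    Nat.toDigitsCore 10 fuel n ds
      = ((Nat.digits 10 n).map Nat.digitChar).reverse ++ ds := by
  induction fuel with
  | zero => intro n ds hn hle; omega
  | succ f ih =>
    intro n ds hn hle
    rw [Nat.toDigitsCore]
    rw [Nat.digits_def' (by norm_num : 1 < 10) hn]
    by_cases hq : n / 10 = 0
    · rw [if_pos hq, hq]
      simp
    · rw [if_neg hq]
      rw [ih (n / 10) _ (Nat.pos_of_ne_zero hq)
        (by have := Nat.div_lt_self hn (by norm_num : 1 < 10); omega)]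
      simp

theorem toDigits_eq (n : Nat) (hn : 0 < n) :
    Nat.toDigits 10 n = ((Nat.digits 10 n).map Nat.digitChar).reverse := by
  rw [Nat.toDigits, toDigitsCore_eq (n + 1) n [] hn (by omega)]
  simp

theorem digitChar_val (d : Nat) (hd : d < 10) :
    ((Nat.digitChar d).toNat : Int) - 48 = (d : Int) := by
  interval_cases d <;> decide

-- PySem.List.max? of a nonempty Int list is `some` of the foldl-max over its tail
theorem max?_cons (m : Int) (l : List Int) :
    PySem.List.max? (m :: l) (fun x => x) = some (l.foldl max m) := by
  induction l generalizing m with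
  | nil => rfl
  | cons x t ih =>
    have hstep : PySem.List.max? (m :: x :: t) (fun x => x)
        = PySem.List.max? (max m x :: t) (fun x => x) := by
      simp only [PySem.List.max?, List.foldl_cons]
      congr 1
      show (if m < x then some x else some m) = some (max m x)
      rw [max_def]
      split_ifs <;> first | rfl | (exfalso; omega) | (simp only [Option.some.injEq]; omega)
    rw [hstep, ih, List.foldl_cons]

theorem max?_reverse_foldl (dl : List Int) (hne : dl ≠ [])
    (hpos : ∀ x ∈ dl, 0 ≤ x) :
    (PySem.List.max? dl.reverse (fun x => x)).getD 0 = dl.foldl max 0 := by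
  obtain ⟨x, t, hxt⟩ := List.exists_cons_of_ne_nil (by simpa using hne : dl.reverse ≠ [])
  have hx : 0 ≤ x := by
    apply hpos
    have : x ∈ dl.reverse := by rw [hxt]; exact List.mem_cons_self
    simpa using this
  have hfold : dl.foldl max 0 = dl.reverse.foldl max 0 := by
    rw [List.foldl_reverse]
    have hcm : (fun (a b : Int) => max b a) = max := by
      funext a b; exact max_comm b a
    rw [hcm, List.foldl_eq_foldr]
  rw [hfold, hxt, max?_cons, Option.getD_some, List.foldl_cons, max_eq_right hx]

-- ===== VERDICT (by name: the statement is the Claim_ definition above) =====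
theorem free_bacon_spec : Claim_equal_free_bacon := by
  intro n _
  unfold Spec_free_bacon free_bacon free_bacon_alt
  by_cases hle : n ≤ 0
  · rw [if_pos hle, freeBaconLoop, dif_neg (by omega : ¬ (0 : Int) < n)]
    norm_num
  · rw [if_neg hle]
    have hk : 0 < n.toNat := by omega
    have hcast : ((n.toNat : Nat) : Int) = n := Int.toNat_of_nonneg (by omega)
    have hchars : PySem.Int.toChars n = Nat.toDigits 10 n.toNat := by
      rw [PySem.Int.toChars, if_neg (by omega : ¬ n < 0)]
    rw [hchars, toDigits_eq n.toNat hk]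
    have hmapped :
        (((Nat.digits 10 n.toNat).map Nat.digitChar).reverse.map
            (fun c => ((c.toNat : Int) - 48)))
          = ((Nat.digits 10 n.toNat).map (fun (d : Nat) => (d : Int))).reverse := by
      rw [List.map_reverse, List.map_map]
      refine congrArg List.reverse (List.map_congr_left ?_)
      intro d hd
      exact digitChar_val d (Nat.digits_lt_base (by norm_num) hd)
    rw [hmapped]
    have hne : ((Nat.digits 10 n.toNat).map (fun (d : Nat) => (d : Int))) ≠ [] := by
      simp only [ne_eq, List.map_eq_nil_iff]
      exact Nat.digits_ne_nil_iff_ne_zero.mpr (by omega)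
    have hpos : ∀ x ∈ (Nat.digits 10 n.toNat).map (fun (d : Nat) => (d : Int)), 0 ≤ x := by
      intro x hx
      simp only [List.mem_map] at hx
      obtain ⟨d, _, rfl⟩ := hx
      exact Int.natCast_nonneg d
    rw [max?_reverse_foldl _ hne hpos]
    conv_lhs => rw [← hcast]
    rw [freeBaconLoop_digits n.toNat hk 0]
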